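-- pv_equiv track=rewrite | github.com/frankwirgit/leet_code | leet_m_level.py | f1104
-- ===== SOURCE A (Python) =====
-- def f1104(label):
--     level, tot = -1, 0
--     while label > tot:
--         level += 1
--         tot += (2 ** level)
--
--     level -= 1
--     cur = label // 2
--     res = [label]
--     while level > -1:
--         st, end = 2 ** level, (2 **(level+1)) - 1
--         cur = st + end - cur
--         res.append(cur)
--         level -= 1
--         cur = cur // 2
--     return res[::-1]
-- ===== SOURCE B (Python) =====
-- def f1104(label):
--     # Top-down closed-form construction: convert the zigzag label to its
--     # plain-BFS label n, read the root-to-node path off the binary prefixes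
--     # of n, and mirror the odd levels back to zigzag labels.
--     L = label.bit_length()                       # node sits on level L - 1
--     n = label if L % 2 else 3 * (1 << (L - 1)) - 1 - label   # plain-BFS label
--     inner = [(n >> (L - 1 - lvl)) if lvl % 2 == 0
--              else 3 * (1 << lvl) - 1 - (n >> (L - 1 - lvl))
--              for lvl in range(L - 1)]
--     return inner + [label]
-- ===== Notes on version B (the rewrite author's own statement) =====
-- stated objective: alternative
-- what changed: A walks from the label up to the root with a per-level mirror-and-halve parent recurrence (after a power-summing level search); B builds the path top-down in closed form: it converts the zigzag label to its plain-BFS label once, reads the whole root-to-node path off the binary prefixes n >> k of that label, and mirrors the odd levels back.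
-- outside the precondition, e.g. on f1104(0): A returns [0], B raises ValueError; on f1104(-5): A returns [-5], B returns [-2, 8, -5]
import Mathlib
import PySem

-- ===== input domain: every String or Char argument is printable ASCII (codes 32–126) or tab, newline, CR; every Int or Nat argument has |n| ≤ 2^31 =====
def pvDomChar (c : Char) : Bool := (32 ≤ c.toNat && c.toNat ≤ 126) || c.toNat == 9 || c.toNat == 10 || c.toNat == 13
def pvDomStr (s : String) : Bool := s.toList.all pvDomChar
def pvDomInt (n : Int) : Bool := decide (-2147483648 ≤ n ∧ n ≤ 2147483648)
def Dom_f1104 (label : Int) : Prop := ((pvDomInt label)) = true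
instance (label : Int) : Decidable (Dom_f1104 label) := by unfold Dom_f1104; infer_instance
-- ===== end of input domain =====

-- B replaces A's bottom-up mirror-and-halve parent walk by a top-down closed-form
-- construction from the binary prefixes of the plain-BFS label; objective: alternative.

-- termination lemmas, cited by name from the ports' decreasing_by
theorem pv_dec1 (label tot level : Int) (h : label > tot) :
    (label - (tot + 2 ^ (level + 1).toNat)).toNat < (label - tot).toNat := by
  have hp : (0:Int) < 2 ^ (level + 1).toNat := pow_pos (by decide) _
  have h2 : label - (tot + 2 ^ (level + 1).toNat) < label - tot :=
    sub_lt_sub_left (lt_add_of_pos_right tot hp) label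
  omega

theorem pv_dec2 (level : Int) (h : level > -1) : ((level - 1) + 1).toNat < (level + 1).toNat := by
  omega

-- ===== PORT A =====
-- first while loop: while label > tot: level += 1; tot += 2 ** level
def f1104_loop1 (label tot level : Int) : Int :=
  if label > tot then f1104_loop1 label (tot + 2 ^ (level + 1).toNat) (level + 1)
  else level
termination_by (label - tot).toNat
decreasing_by exact pv_dec1 label tot level ‹label > tot›

-- second while loop: while level > -1: mirror cur in the level, append, descend
def f1104_loop2 (level cur : Int) (res : List Int) : List Int :=
  if level > -1 then
    let st : Int := 2 ^ level.toNat
    let en : Int := 2 ^ (level + 1).toNat - 1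
    let c := st + en - cur
    f1104_loop2 (level - 1) (PySem.Int.floordiv c 2) (res ++ [c])
  else res
termination_by (level + 1).toNat
decreasing_by exact pv_dec2 level ‹level > -1›

def f1104 (label : Int) : List Int :=
  let level := f1104_loop1 label 0 (-1)
  -- level -= 1; cur = label // 2; res = [label]; second loop; res[::-1] (= reverse, exact)
  (f1104_loop2 (level - 1) (PySem.Int.floordiv label 2) [label]).reverse

-- ===== PORT B =====
-- L = label.bit_length(); n = plain-BFS label; comprehension over range(L-1); n >> k = floordiv by 2^k (exact)
def f1104_alt (label : Int) : List Int :=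
  let L := PySem.Int.bitLength label
  let n : Int := if L % 2 = 1 then label else 3 * 2 ^ (L - 1) - 1 - label
  let inner := (List.range (L - 1)).map (fun lvl =>
    if lvl % 2 = 0 then PySem.Int.floordiv n (2 ^ (L - 1 - lvl))
    else 3 * 2 ^ lvl - 1 - PySem.Int.floordiv n (2 ^ (L - 1 - lvl)))
  inner ++ [label]

-- ===== PRECONDITION & SPEC =====
-- Pre_ excludes non-positive labels, which are not labels of any node of the (1-indexed)
-- zigzag tree: A returns its seed list [label] there untouched (both loops are skipped), an
-- accident of the implementation that B's bit-length-based construction cannot reproduce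
-- (B raises or returns meaningless values there).
def Pre_f1104 (label : Int) : Prop := 1 ≤ label
instance (label : Int) : Decidable (Pre_f1104 label) := by unfold Pre_f1104; infer_instance

def pvWitness_f1104 : Int := (14)

def Spec_f1104 (label : Int) (out : List Int) : Prop := out = f1104_alt label
instance (label : Int) (out : List Int) : Decidable (Spec_f1104 label out) := by unfold Spec_f1104; infer_instance

-- ===== CLAIM (what is proved, stated in full; the proofs are below) =====
def Claim_equal_f1104 : Prop := ∀ (label : Int), Dom_f1104 label → Pre_f1104 label → Spec_f1104 label (f1104 label)

-- ===== LEMMAS AND PROOFS =====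

theorem pv_bitLength_bounds (n : Int) (h : 1 ≤ n) :
    (2:Int) ^ (PySem.Int.bitLength n - 1) ≤ n ∧ n < 2 ^ PySem.Int.bitLength n ∧ 1 ≤ PySem.Int.bitLength n := by
  have h0 : (n.natAbs : Int) = n := Int.natAbs_of_nonneg (le_trans zero_le_one h)
  have h2 := PySem.Int.two_pow_bitLength_le n (by rintro rfl; exact absurd h (by decide))
  have h3 := PySem.Int.lt_two_pow_bitLength n
  have hB : 1 ≤ PySem.Int.bitLength n := by
    rcases Nat.eq_zero_or_pos (PySem.Int.bitLength n) with hz | hp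
    · rw [hz, pow_zero, Nat.lt_one_iff, Int.natAbs_eq_zero] at h3
      subst h3; exact absurd h (by decide)
    · exact hp
  refine ⟨?_, ?_, hB⟩
  · calc (2:Int) ^ (PySem.Int.bitLength n - 1) ≤ (n.natAbs : Int) := by exact_mod_cast h2
      _ = n := h0
  · calc n = (n.natAbs : Int) := h0.symm
      _ < 2 ^ PySem.Int.bitLength n := by exact_mod_cast h3

-- let-free unfolding lemmas for the recursions
theorem pv_loop1_step (label tot level : Int) (h : label > tot) :
    f1104_loop1 label tot level = f1104_loop1 label (tot + 2 ^ (level + 1).toNat) (level + 1) := by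
  rw [f1104_loop1, if_pos h]

theorem pv_loop1_base (label tot level : Int) (h : ¬ label > tot) :
    f1104_loop1 label tot level = level := by
  rw [f1104_loop1, if_neg h]

theorem pv_loop2_step (level cur : Int) (res : List Int) (h : level > -1) :
    f1104_loop2 level cur res
      = f1104_loop2 (level - 1)
          (PySem.Int.floordiv (2 ^ level.toNat + (2 ^ (level + 1).toNat - 1) - cur) 2)
          (res ++ [2 ^ level.toNat + (2 ^ (level + 1).toNat - 1) - cur]) := by
  rw [f1104_loop2, if_pos h]

theorem pv_loop2_base (level cur : Int) (res : List Int) (h : ¬ level > -1) :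
    f1104_loop2 level cur res = res := by
  rw [f1104_loop2, if_neg h]

theorem pv_f1104_def (label : Int) :
    f1104 label = (f1104_loop2 (f1104_loop1 label 0 (-1) - 1) (PySem.Int.floordiv label 2) [label]).reverse := rfl

-- bitLength is characterised by the dyadic bracket
theorem pv_bitLength_eq (n : Int) (k : Nat) (h1 : (2:Int)^k ≤ n) (h2 : n < 2^(k+1)) :
    PySem.Int.bitLength n = k + 1 := by
  have hn : 1 ≤ n := le_trans (one_le_pow₀ (by norm_num)) h1
  obtain ⟨b1, b2, hB⟩ := pv_bitLength_bounds n hn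
  have hkB : k < PySem.Int.bitLength n := by
    have hlt : (2:Int)^k < 2^(PySem.Int.bitLength n) := lt_of_le_of_lt h1 b2
    exact (pow_lt_pow_iff_right₀ (by norm_num : (1:Int) < 2)).mp hlt
  have hBk : PySem.Int.bitLength n - 1 < k + 1 := by
    have hlt : (2:Int)^(PySem.Int.bitLength n - 1) < 2^(k+1) := lt_of_le_of_lt b1 h2
    exact (pow_lt_pow_iff_right₀ (by norm_num : (1:Int) < 2)).mp hlt
  omega

theorem pv_lt_bitLength (label : Int) (m : Nat) (hl : 1 ≤ label) (hm : (2:Int)^m ≤ label) :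
    m < PySem.Int.bitLength label := by
  obtain ⟨b1, b2, hB⟩ := pv_bitLength_bounds label hl
  have hlt : (2:Int)^m < 2^(PySem.Int.bitLength label) := lt_of_le_of_lt hm b2
  exact (pow_lt_pow_iff_right₀ (by norm_num : (1:Int) < 2)).mp hlt

-- A's first loop computes bit_length − 1 (invariant: after visiting level m−1, tot = 2^m − 1)
theorem pv_loop1_spec (label : Int) (hl : 1 ≤ label) :
    ∀ (n m : Nat), n = PySem.Int.bitLength label - m → (2:Int)^m - 1 < label →
      f1104_loop1 label ((2:Int)^m - 1) ((m:Int) - 1) = (PySem.Int.bitLength label : Int) - 1 := by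
  intro n
  induction n with
  | zero =>
    intro m hn hlt
    exfalso
    have := pv_lt_bitLength label m hl (by omega)
    omega
  | succ n ih =>
    intro m hn hlt
    rw [pv_loop1_step label _ _ (by omega)]
    have harg1 : (2:Int)^m - 1 + 2 ^ ((((m:Int) - 1) + 1).toNat) = 2^(m+1) - 1 := by
      rw [show (((m:Int) - 1) + 1).toNat = m from by omega, pow_succ]
      have := mul_comm ((2:Int)^m) 2
      omega
    have harg2 : ((m:Int) - 1) + 1 = ((m+1:Nat):Int) - 1 := by push_cast; ring
    rw [harg1, harg2]
    by_cases hc : (2:Int)^(m+1) - 1 < label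
    · have hm := pv_lt_bitLength label m hl (by omega)
      exact ih (m+1) (by omega) hc
    · rw [pv_loop1_base label _ _ (by omega)]
      have hbl : PySem.Int.bitLength label = m + 1 := pv_bitLength_eq label m (by omega) (by omega)
      rw [hbl]

-- loop2 accumulates on the right of res
theorem pv_loop2_acc : ∀ (n : Nat) (level cur : Int) (res : List Int), (level + 1).toNat ≤ n →
    f1104_loop2 level cur res = res ++ f1104_loop2 level cur [] := by
  intro n
  induction n with
  | zero =>
    intro level cur res h
    rw [pv_loop2_base _ _ _ (by omega), pv_loop2_base _ _ _ (by omega), List.append_nil]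
  | succ n ih =>
    intro level cur res h
    by_cases hl : level > -1
    · rw [pv_loop2_step _ _ _ hl, pv_loop2_step _ _ [] hl,
        ih _ _ (res ++ _) (by omega), ih _ _ ([] ++ _) (by omega)]
      simp
    · rw [pv_loop2_base _ _ _ hl, pv_loop2_base _ _ _ hl, List.append_nil]

-- A's parent recurrence: for label ≥ 2, A's path is A's path of the zigzag parent plus [label]
theorem pv_A_rec (label : Int) (h : 2 ≤ label) :
    f1104 label
      = f1104 (PySem.Int.floordiv (2 ^ (PySem.Int.bitLength label - 1) + (2 ^ PySem.Int.bitLength label - 1) - label) 2)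
        ++ [label] := by
  obtain ⟨b1, b2, hB⟩ := pv_bitLength_bounds label (by omega)
  have hB2 : 2 ≤ PySem.Int.bitLength label := pv_lt_bitLength label 1 (by omega) (by norm_num; omega)
  set B := PySem.Int.bitLength label with hBdef
  set p : Int := PySem.Int.floordiv (2 ^ (B - 1) + (2 ^ B - 1) - label) 2 with hp
  obtain ⟨k, hk⟩ : ∃ k, B = k + 2 := ⟨B - 2, by omega⟩
  have hpk : (0:Int) < 2 ^ k := by positivity
  have hek1 : (2:Int) ^ (B - 1) = 2 * 2 ^ k := by
    rw [hk, show k + 2 - 1 = k + 1 from by omega, pow_succ]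
    exact mul_comm _ _
  have hek2 : (2:Int) ^ B = 4 * 2 ^ k := by
    rw [hk, pow_add]
    have : (2:Int) ^ 2 = 4 := by norm_num
    rw [this]
    exact mul_comm _ _
  have hb1 : 2 * 2 ^ k ≤ label := by rw [← hek1]; exact b1
  have hb2 : label < 4 * 2 ^ k := by rw [← hek2]; exact b2
  have hpv : p = (2 * 2 ^ k + (4 * 2 ^ k - 1) - label) / 2 := by
    rw [hp, PySem.Int.floordiv_eq_ediv_of_pos (by norm_num : (0:Int) < 2), hek1, hek2]
  have hplo : (2:Int) ^ k ≤ p := by rw [hpv]; omega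
  have hphi : p < 2 * 2 ^ k := by rw [hpv]; omega
  have hp1 : 1 ≤ p := by omega
  have hBp : PySem.Int.bitLength p = k + 1 := by
    refine pv_bitLength_eq p k hplo ?_
    rw [pow_succ]
    have := mul_comm ((2:Int)^k) 2
    omega
  have hL1 : f1104_loop1 label 0 (-1) = (B : Int) - 1 := by
    have hs := pv_loop1_spec label (by omega) B 0 (by omega) (by norm_num; omega)
    norm_num at hs
    exact hs
  have hL1p : f1104_loop1 p 0 (-1) = (PySem.Int.bitLength p : Int) - 1 := by
    have hs := pv_loop1_spec p hp1 (PySem.Int.bitLength p) 0 (by omega) (by norm_num; omega)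
    norm_num at hs
    exact hs
  rw [pv_f1104_def, pv_f1104_def, hL1, hL1p, hBp]
  have hc1 : (B:Int) - 1 - 1 = (k:Int) := by omega
  have hc2 : ((k+1:Nat):Int) - 1 - 1 = (k:Int) - 1 := by push_cast; ring
  rw [hc1, hc2]
  have hstep := pv_loop2_step (k:Int) (PySem.Int.floordiv label 2) [label] (by omega)
  rw [show ((k:Int)).toNat = k from by omega, show ((k:Int) + 1).toNat = k + 1 from by omega] at hstep
  have hcp : (2:Int) ^ k + (2 ^ (k+1) - 1) - PySem.Int.floordiv label 2 = p := by
    rw [PySem.Int.floordiv_eq_ediv_of_pos (by norm_num : (0:Int) < 2), hpv, pow_succ]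
    have := mul_comm ((2:Int)^k) 2
    omega
  rw [hcp] at hstep
  rw [hstep]
  rw [pv_loop2_acc (k+1) ((k:Int) - 1) (PySem.Int.floordiv p 2) ([label] ++ [p]) (by omega),
      pv_loop2_acc (k+1) ((k:Int) - 1) (PySem.Int.floordiv p 2) [p] (by omega)]
  simp

-- let-free characterisation of f1104_alt
theorem pv_alt_def (label : Int) :
    f1104_alt label
      = (List.range (PySem.Int.bitLength label - 1)).map (fun lvl =>
          if lvl % 2 = 0 then
            PySem.Int.floordiv
              (if PySem.Int.bitLength label % 2 = 1 then label
               else 3 * 2 ^ (PySem.Int.bitLength label - 1) - 1 - label)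
              (2 ^ (PySem.Int.bitLength label - 1 - lvl))
          else 3 * 2 ^ lvl - 1 -
            PySem.Int.floordiv
              (if PySem.Int.bitLength label % 2 = 1 then label
               else 3 * 2 ^ (PySem.Int.bitLength label - 1) - 1 - label)
              (2 ^ (PySem.Int.bitLength label - 1 - lvl)))
        ++ [label] := rfl

-- B's parent recurrence: the closed-form path satisfies the same recurrence as A
theorem pv_B_rec (label : Int) (h : 2 ≤ label) :
    f1104_alt label
      = f1104_alt (PySem.Int.floordiv (2 ^ (PySem.Int.bitLength label - 1) + (2 ^ PySem.Int.bitLength label - 1) - label) 2)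
        ++ [label] := by
  obtain ⟨b1, b2, hB⟩ := pv_bitLength_bounds label (by omega)
  have hB2 : 2 ≤ PySem.Int.bitLength label := pv_lt_bitLength label 1 (by omega) (by norm_num; omega)
  set B := PySem.Int.bitLength label with hBdef
  set p : Int := PySem.Int.floordiv (2 ^ (B - 1) + (2 ^ B - 1) - label) 2 with hp
  obtain ⟨k, hk⟩ : ∃ k, B = k + 2 := ⟨B - 2, by omega⟩
  have hpk : (0:Int) < 2 ^ k := by positivity
  have hek1 : (2:Int) ^ (B - 1) = 2 * 2 ^ k := by
    rw [hk, show k + 2 - 1 = k + 1 from by omega, pow_succ]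
    exact mul_comm _ _
  have hek2 : (2:Int) ^ B = 4 * 2 ^ k := by
    rw [hk, pow_add]
    have : (2:Int) ^ 2 = 4 := by norm_num
    rw [this]
    exact mul_comm _ _
  have hb1 : 2 * 2 ^ k ≤ label := by rw [← hek1]; exact b1
  have hb2 : label < 4 * 2 ^ k := by rw [← hek2]; exact b2
  have hpv : p = (2 * 2 ^ k + (4 * 2 ^ k - 1) - label) / 2 := by
    rw [hp, PySem.Int.floordiv_eq_ediv_of_pos (by norm_num : (0:Int) < 2), hek1, hek2]
  have hplo : (2:Int) ^ k ≤ p := by rw [hpv]; omega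
  have hphi : p < 2 * 2 ^ k := by rw [hpv]; omega
  have hp1 : 1 ≤ p := by omega
  have hBp : PySem.Int.bitLength p = k + 1 := by
    refine pv_bitLength_eq p k hplo ?_
    rw [pow_succ]
    have := mul_comm ((2:Int)^k) 2
    omega
  rw [pv_alt_def label, pv_alt_def p, ← hBdef, hBp, hk]
  rw [show k + 2 - 1 = k + 1 from by omega, show k + 1 - 1 = k from by omega]
  -- abbreviate the two plain-BFS labels
  set N : Int := if (k + 2) % 2 = 1 then label else 3 * 2 ^ (k + 1) - 1 - label with hN
  set N' : Int := if (k + 1) % 2 = 1 then p else 3 * 2 ^ k - 1 - p with hN'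
  have hNdiv : N' = N / 2 := by
    obtain ⟨m, hm⟩ | ⟨m, hm⟩ := Nat.even_or_odd k
    · have h1 : ¬ (k + 2) % 2 = 1 := by omega
      have h2 : (k + 1) % 2 = 1 := by omega
      rw [hN, hN', if_neg h1, if_pos h2, hpv, pow_succ]
      have := mul_comm ((2:Int)^k) 2
      omega
    · have h1 : (k + 2) % 2 = 1 := by omega
      have h2 : ¬ (k + 1) % 2 = 1 := by omega
      rw [hN, hN', if_pos h1, if_neg h2, hpv]
      omega
  have hshift : ∀ j : Nat, PySem.Int.floordiv N (2 ^ (j + 1)) = PySem.Int.floordiv N' (2 ^ j) := by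
    intro j
    rw [PySem.Int.floordiv_eq_ediv_of_pos (by positivity),
        PySem.Int.floordiv_eq_ediv_of_pos (by positivity), hNdiv,
        Int.ediv_ediv_of_nonneg (by norm_num : (0:Int) ≤ 2), pow_succ]
    rw [mul_comm ((2:Int)) ((2:Int)^j)]
  rw [List.range_succ, List.map_append]
  have hpref : ∀ lvl ∈ List.range k,
      (if lvl % 2 = 0 then PySem.Int.floordiv N (2 ^ (k + 1 - lvl))
       else 3 * 2 ^ lvl - 1 - PySem.Int.floordiv N (2 ^ (k + 1 - lvl)))
    = (if lvl % 2 = 0 then PySem.Int.floordiv N' (2 ^ (k - lvl))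
       else 3 * 2 ^ lvl - 1 - PySem.Int.floordiv N' (2 ^ (k - lvl))) := by
    intro lvl hmem
    have hlt : lvl < k := List.mem_range.mp hmem
    rw [show k + 1 - lvl = (k - lvl) + 1 from by omega, hshift]
  rw [List.map_congr_left hpref]
  have hlast :
      (if k % 2 = 0 then PySem.Int.floordiv N (2 ^ (k + 1 - k))
       else 3 * 2 ^ k - 1 - PySem.Int.floordiv N (2 ^ (k + 1 - k))) = p := by
    rw [show k + 1 - k = 1 from by omega, pow_one,
        PySem.Int.floordiv_eq_ediv_of_pos (by norm_num : (0:Int) < 2)]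
    obtain ⟨m, hm⟩ | ⟨m, hm⟩ := Nat.even_or_odd k
    · rw [if_pos (by omega : k % 2 = 0), ← hNdiv, hN', if_pos (by omega : (k + 1) % 2 = 1)]
    · rw [if_neg (by omega : ¬ k % 2 = 0), hN, if_pos (by omega : (k + 2) % 2 = 1), hpv]
      omega
  simp only [List.map_cons, List.map_nil]
  rw [hlast]

-- main induction: A = B on positive labels
theorem pv_main : ∀ (fuel : Nat) (label : Int), label.toNat ≤ fuel → 1 ≤ label →
    f1104 label = f1104_alt label := by
  intro fuel
  induction fuel with
  | zero => intro label hle hl; omega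
  | succ fuel ih =>
    intro label hle hl
    by_cases h1 : label = 1
    · subst h1
      have hA1 : f1104 1 = [1] := by
        have e1 : f1104_loop1 1 0 (-1) = 0 := by
          rw [pv_loop1_step 1 0 (-1) (by norm_num),
              show ((-1:Int) + 1).toNat = 0 from by omega,
              show (-1:Int) + 1 = 0 from by norm_num,
              show (0:Int) + 2 ^ 0 = 1 from by norm_num]
          exact pv_loop1_base 1 1 0 (by norm_num)
        rw [pv_f1104_def, e1, show (0:Int) - 1 = -1 from by norm_num,
            pv_loop2_base _ _ _ (by norm_num)]
        rfl
      have hB1 : f1104_alt 1 = [1] := by decide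
      rw [hA1, hB1]
    · have h2 : 2 ≤ label := by omega
      obtain ⟨b1, b2, hB⟩ := pv_bitLength_bounds label (by omega)
      have hB2 : 2 ≤ PySem.Int.bitLength label := pv_lt_bitLength label 1 (by omega) (by norm_num; omega)
      set B := PySem.Int.bitLength label with hBdef
      set p : Int := PySem.Int.floordiv (2 ^ (B - 1) + (2 ^ B - 1) - label) 2 with hp
      have hP1 : (2:Int) ≤ 2 ^ (B - 1) := by
        calc (2:Int) = 2 ^ 1 := by norm_num
          _ ≤ 2 ^ (B - 1) := pow_le_pow_right₀ (by norm_num) (by omega)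
      have heB : (2:Int) ^ B = 2 * 2 ^ (B - 1) := by
        rw [show B = (B - 1) + 1 from by omega, pow_succ]
        exact mul_comm _ _
      have hpv : p = (2 ^ (B - 1) + (2 * 2 ^ (B - 1) - 1) - label) / 2 := by
        rw [hp, PySem.Int.floordiv_eq_ediv_of_pos (by norm_num : (0:Int) < 2), heB]
      have hb2 : label < 2 * 2 ^ (B - 1) := by rw [← heB]; exact b2
      have hp1 : 1 ≤ p := by rw [hpv]; omega
      have hplt : p < label := by rw [hpv]; omega
      rw [pv_A_rec label h2, pv_B_rec label h2, ← hBdef, ← hp]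
      rw [ih p (by omega) hp1]

-- ===== VERDICT (by name: the statement is the Claim_ definition above) =====
theorem f1104_spec : Claim_equal_f1104 := by
  intro label _ hpre
  exact pv_main label.toNat label le_rfl hpre
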